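-- pv_equiv track=rewrite | github.com/teddashh/clawd-lobster | clawd_lobster/onboarding/state_store.py | compute_phase
-- ===== SOURCE A (Python) =====
-- def compute_phase(state: dict) -> str:
--     """Recompute the current phase based on item statuses."""
--     items = state.get("items", [])
--
--     foundations = [i for i in items if i.get("tier") == "foundation"]
--     required = [i for i in items if i.get("tier") == "required"]
--     optional = [i for i in items if i.get("tier") == "optional"]
--
--     def all_done(group: list) -> bool:
--         return all(i.get("status") in ("succeeded", "skipped") for i in group)
--
--     if not all_done(foundations):
--         return "foundations"
--     if not all_done(required):
--         return "skills_required"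
--     if optional and not all_done(optional):
--         return "skills_optional"
--     return "complete"
-- ===== SOURCE B (Python) =====
-- def compute_phase(state: dict) -> str:
--     """Recompute the current phase in one pass over the items."""
--     found_ok = req_ok = opt_ok = True
--     has_optional = False
--     for i in state.get("items", []):
--         tier = i.get("tier")
--         done = i.get("status") in ("succeeded", "skipped")
--         if tier == "foundation":
--             found_ok = found_ok and done
--         elif tier == "required":
--             req_ok = req_ok and done
--         elif tier == "optional":
--             opt_ok = opt_ok and done
--             has_optional = True
--     if not found_ok:
--         return "foundations"
--     if not req_ok:
--         return "skills_required"
--     if has_optional and not opt_ok: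
--         return "skills_optional"
--     return "complete"
-- ===== Notes on version B (the rewrite author's own statement) =====
-- stated objective: simpler
-- what changed: Replaces the three filtered intermediate lists plus repeated all() scans with a single pass over the items maintaining three boolean done-flags and a has_optional flag, then the same ordered cascade.
import Mathlib
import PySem

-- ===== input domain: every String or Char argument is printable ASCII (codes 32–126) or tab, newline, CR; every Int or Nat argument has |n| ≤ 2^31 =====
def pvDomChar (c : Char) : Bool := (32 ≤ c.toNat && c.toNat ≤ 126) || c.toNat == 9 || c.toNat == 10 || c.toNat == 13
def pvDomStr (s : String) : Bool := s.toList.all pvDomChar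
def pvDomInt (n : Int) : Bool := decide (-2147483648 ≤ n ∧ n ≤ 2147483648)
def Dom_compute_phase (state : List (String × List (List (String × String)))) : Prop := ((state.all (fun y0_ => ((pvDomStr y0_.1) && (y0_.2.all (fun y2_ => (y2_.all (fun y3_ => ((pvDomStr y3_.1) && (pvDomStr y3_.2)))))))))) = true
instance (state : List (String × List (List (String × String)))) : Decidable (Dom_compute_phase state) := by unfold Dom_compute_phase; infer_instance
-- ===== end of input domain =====

-- B is a single pass over the items maintaining boolean flags, instead of A's three filtered lists scanned by all().

-- ===== PORT A =====
-- dict.get(k): first-match lookup in the association list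
def assocGet {α : Type} (d : List (String × α)) (k : String) : Option α :=
  match d with
  | [] => none
  | (k', v) :: r => if k' == k then some v else assocGet r k

-- i.get("status") in ("succeeded", "skipped")
def pvDone (i : List (String × String)) : Bool :=
  assocGet i "status" == some "succeeded" || assocGet i "status" == some "skipped"

def allDone (group : List (List (String × String))) : Bool :=
  group.all pvDone

def compute_phase (state : List (String × List (List (String × String)))) : String :=
  let items := (assocGet state "items").getD []
  let foundations := items.filter (fun i => assocGet i "tier" == some "foundation")
  let required := items.filter (fun i => assocGet i "tier" == some "required")
  let optional := items.filter (fun i => assocGet i "tier" == some "optional")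
  if ¬ allDone foundations then "foundations"
  else if ¬ allDone required then "skills_required"
  else if ¬ optional.isEmpty ∧ ¬ allDone optional then "skills_optional"
  else "complete"

-- ===== PORT B =====
-- loop state: (found_ok, req_ok, opt_ok, has_optional)
def pvStep (s : Bool × Bool × Bool × Bool) (i : List (String × String)) : Bool × Bool × Bool × Bool :=
  let tier := assocGet i "tier"
  let done := pvDone i
  if tier == some "foundation" then (s.1 && done, s.2.1, s.2.2.1, s.2.2.2)
  else if tier == some "required" then (s.1, s.2.1 && done, s.2.2.1, s.2.2.2)
  else if tier == some "optional" then (s.1, s.2.1, s.2.2.1 && done, true)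
  else s

def compute_phase_alt (state : List (String × List (List (String × String)))) : String :=
  let items := (assocGet state "items").getD []
  let r := items.foldl pvStep (true, true, true, false)
  if ¬ r.1 then "foundations"
  else if ¬ r.2.1 then "skills_required"
  else if r.2.2.2 ∧ ¬ r.2.2.1 then "skills_optional"
  else "complete"

-- ===== PRECONDITION & SPEC =====
def Spec_compute_phase (state : List (String × List (List (String × String)))) (out : String) : Prop := out = compute_phase_alt state
instance (state : List (String × List (List (String × String)))) (out : String) : Decidable (Spec_compute_phase state out) := by unfold Spec_compute_phase; infer_instance

-- ===== CLAIM (what is proved, stated in full; the proofs are below) =====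
def Claim_equal_compute_phase : Prop := ∀ (state : List (String × List (List (String × String)))), Dom_compute_phase state → Spec_compute_phase state (compute_phase state)

-- ===== LEMMAS AND PROOFS =====

-- the fold computes the three filtered all-done flags and the nonemptiness of the optional group
theorem foldl_pvStep (items : List (List (String × String))) (f r o h : Bool) :
    items.foldl pvStep (f, r, o, h) =
      (f && allDone (items.filter (fun i => assocGet i "tier" == some "foundation")),
       r && allDone (items.filter (fun i => assocGet i "tier" == some "required")),
       o && allDone (items.filter (fun i => assocGet i "tier" == some "optional")),
       h || !(items.filter (fun i => assocGet i "tier" == some "optional")).isEmpty) := by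
  induction items generalizing f r o h with
  | nil => simp [allDone]
  | cons i rest ih =>
    simp only [List.foldl_cons, pvStep]
    by_cases h1 : assocGet i "tier" == some "foundation"
    · simp [eq_of_beq h1, ih, allDone, Bool.and_assoc]
    · by_cases h2 : assocGet i "tier" == some "required"
      · simp [eq_of_beq h2, ih, allDone, Bool.and_assoc]
      · by_cases h3 : assocGet i "tier" == some "optional"
        · simp [eq_of_beq h3, ih, allDone, Bool.and_assoc, List.isEmpty]
        · simp [h1, h2, h3, ih]

theorem compute_phase_eq_alt (state : List (String × List (List (String × String)))) :
    compute_phase state = compute_phase_alt state := by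
  simp only [compute_phase, compute_phase_alt, foldl_pvStep, Bool.true_and, Bool.false_or]
  split_ifs with h1 h2 h3 h4 h5 <;> simp_all

-- ===== VERDICT (by name: the statement is the Claim_ definition above) =====
theorem compute_phase_spec : Claim_equal_compute_phase := by
  intro state _
  exact compute_phase_eq_alt state
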